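-- pv_equiv track=rewrite | github.com/liamcal/aoc | 23/07/solver.py | has_n_of_a_kind_1
-- ===== SOURCE A (Python) =====
-- def has_n_of_a_kind_1(hand_string: str, n: int):
--     success = False
--     matches = 0
--     counted = set()
--     for c in hand_string:
--         if hand_string.count(c) == n and c not in counted:
--             counted.add(c)
--             matches += 1
--             success = True
--     return success, matches
-- ===== SOURCE B (Python) =====
-- def has_n_of_a_kind_1(hand_string: str, n: int):
--     chars = sorted(hand_string)
--     matches = 0
--     i = 0
--     while i < len(chars):
--         j = i
--         while j < len(chars) and chars[j] == chars[i]: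
--             j += 1
--         if j - i == n:
--             matches += 1
--         i = j
--     return matches > 0, matches
-- ===== Notes on version B (the rewrite author's own statement) =====
-- stated objective: faster
-- what changed: A calls hand_string.count(c) for every character (quadratic rescans) and tracks a 'counted' set; B sorts the characters once and counts maximal runs of equal characters whose length is n in a single scan.
import Mathlib
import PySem

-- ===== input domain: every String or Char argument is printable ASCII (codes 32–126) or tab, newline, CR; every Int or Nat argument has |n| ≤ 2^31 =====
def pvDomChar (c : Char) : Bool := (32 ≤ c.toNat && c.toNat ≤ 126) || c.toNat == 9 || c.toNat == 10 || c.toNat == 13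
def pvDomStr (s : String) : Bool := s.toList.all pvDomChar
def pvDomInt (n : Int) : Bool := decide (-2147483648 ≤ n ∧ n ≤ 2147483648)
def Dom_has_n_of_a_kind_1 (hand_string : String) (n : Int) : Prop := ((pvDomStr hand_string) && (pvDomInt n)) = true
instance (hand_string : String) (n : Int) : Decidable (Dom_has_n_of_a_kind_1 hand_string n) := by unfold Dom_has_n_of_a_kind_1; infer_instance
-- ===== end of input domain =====

-- B re-implements the per-character `hand_string.count` scan of A by a sort-then-run-length scan; return value only, no side effects.

-- ===== PORT A =====
-- `hand_string.count(c)` for a single character c is ported by hand as the char count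
-- of the string's character list (exact: counting a 1-char substring = counting the char).
def has_n_of_a_kind_1 (hand_string : String) (n : Int) : Bool × Int :=
  let l := hand_string.toList
  let fin := l.foldl
    (fun (st : Bool × Int × PySem.Set Char) c =>
      if (l.count c : Int) = n ∧ ¬ (PySem.Set.contains st.2.2 c) then
        (true, st.2.1 + 1, PySem.Set.add st.2.2 c)
      else st)
    (false, 0, PySem.Set.empty)
  (fin.1, fin.2.1)

-- ===== PORT B =====
-- inner `while` advancing j over equal chars = takeWhile/dropWhile on the run; j - i = run length
def altGo (n : Int) : List Char → Int
  | [] => 0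
  | c :: t =>
      (if (((c :: t).takeWhile (fun d => d == c)).length : Int) = n then 1 else 0)
      + altGo n ((c :: t).dropWhile (fun d => d == c))
termination_by l => l.length
decreasing_by
  simp
  exact List.length_dropWhile_le _ _

def has_n_of_a_kind_1_alt (hand_string : String) (n : Int) : Bool × Int :=
  let chars := PySem.List.sorted hand_string.toList (fun c => c) false
  let m := altGo n chars
  (decide (m > 0), m)

-- ===== PRECONDITION & SPEC =====
def Spec_has_n_of_a_kind_1 (hand_string : String) (n : Int) (out : Bool × Int) : Prop := out = has_n_of_a_kind_1_alt hand_string n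
instance (hand_string : String) (n : Int) (out : Bool × Int) : Decidable (Spec_has_n_of_a_kind_1 hand_string n out) := by unfold Spec_has_n_of_a_kind_1; infer_instance

-- ===== CLAIM (what is proved, stated in full; the proofs are below) =====
def Claim_equal_has_n_of_a_kind_1 : Prop := ∀ (hand_string : String) (n : Int), Dom_has_n_of_a_kind_1 hand_string n → Spec_has_n_of_a_kind_1 hand_string n (has_n_of_a_kind_1 hand_string n)

-- ===== LEMMAS AND PROOFS =====

-- the number both programs compute: distinct characters of l whose count in l is n
def nKindCard (l : List Char) (n : Int) : Int :=
  ((l.toFinset.filter (fun c => (l.count c : Int) = n)).card : Int)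

-- ---- A side ----
lemma A_fold_inv (l : List Char) (n : Int) :
    ∀ (t : List Char) (cnt : List Char), cnt.Nodup →
      (t.foldl
        (fun (st : Bool × Int × PySem.Set Char) c =>
          if (l.count c : Int) = n ∧ ¬ (PySem.Set.contains st.2.2 c) then
            (true, st.2.1 + 1, PySem.Set.add st.2.2 c)
          else st)
        (decide (cnt ≠ []), (cnt.length : Int), cnt))
      = (let cnt' := t.foldl (fun (s : PySem.Set Char) c =>
            if (l.count c : Int) = n then PySem.Set.add s c else s) cnt
         (decide (cnt' ≠ []), (cnt'.length : Int), cnt')) := by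
  intro t
  induction t with
  | nil => intro cnt _; simp
  | cons c t ih =>
    intro cnt hnd
    simp only [List.foldl_cons]
    by_cases hp : (l.count c : Int) = n
    · by_cases hc : c ∈ cnt
      · have hct : PySem.Set.contains cnt c = true := (PySem.Set.contains_iff cnt c).mpr hc
        have hadd : PySem.Set.add cnt c = cnt := PySem.Set.add_of_mem hc
        simp only [hp, hct, hadd, not_true, and_false, if_false]
        have := ih cnt hnd
        simpa [hp, hadd] using this
      · have hct : PySem.Set.contains cnt c = false := by
          by_contra h
          exact hc ((PySem.Set.contains_iff cnt c).mp (by simpa using h))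
        have hadd : PySem.Set.add cnt c = cnt ++ [c] := PySem.Set.add_of_not_mem hc
        have hnd' : (cnt ++ [c]).Nodup := by
          simp only [List.nodup_append, List.nodup_cons, List.not_mem_nil, not_false_eq_true,
            List.nodup_nil, and_true, true_and]
          exact ⟨hnd, fun a ha b hb => by simp only [List.mem_singleton] at hb; subst hb; rintro rfl; exact hc ha⟩
        have hlen : ((cnt ++ [c]).length : Int) = (cnt.length : Int) + 1 := by
          simp
        have hne : (decide (cnt ++ [c] ≠ []) : Bool) = true := by simp
        have := ih (cnt ++ [c]) hnd'
        simp only [hp, hct, hadd, true_and, Bool.false_eq_true, not_false_eq_true, if_pos]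
        rw [← hne, ← hlen]
        simpa [hp, hadd] using this
    · have := ih cnt hnd
      simp only [hp, false_and, if_false]
      simpa [hp] using this

lemma A_matches (hand_string : String) (n : Int) :
    (has_n_of_a_kind_1 hand_string n).2 = nKindCard hand_string.toList n ∧
    (has_n_of_a_kind_1 hand_string n).1 = decide (0 < nKindCard hand_string.toList n) := by
  have h0 : ((false, (0:Int), (PySem.Set.empty : PySem.Set Char)) : Bool × Int × PySem.Set Char)
      = (decide (([] : List Char) ≠ []), ((([] : List Char).length : Nat) : Int), ([] : List Char)) := by
    simp [PySem.Set.empty]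
  have hfold := A_fold_inv hand_string.toList n hand_string.toList [] List.nodup_nil
  have hrw : has_n_of_a_kind_1 hand_string n =
      (let cnt' := hand_string.toList.foldl
        (fun (st : PySem.Set Char) c =>
          if (hand_string.toList.count c : Int) = n then PySem.Set.add st c else st) []
       (decide (cnt' ≠ []), (cnt'.length : Int))) := by
    unfold has_n_of_a_kind_1
    simp only [h0, hfold]
  set cnt' := hand_string.toList.foldl
      (fun (st : PySem.Set Char) c =>
        if (hand_string.toList.count c : Int) = n then PySem.Set.add st c else st) [] with hdef
  have hcnt : cnt' = PySem.Set.ofList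
      (hand_string.toList.filter (fun c => decide ((hand_string.toList.count c : Int) = n))) := by
    rw [hdef, PySem.Set.ofList_eq_foldl, List.foldl_filter]
    simp
  have hndp : cnt'.Nodup := by rw [hcnt]; exact PySem.Set.nodup_ofList _
  have hfin : cnt'.toFinset
      = hand_string.toList.toFinset.filter (fun c => (hand_string.toList.count c : Int) = n) := by
    rw [hcnt]
    ext x
    simp [PySem.Set.mem_ofList, List.mem_filter]
  have hlen : (cnt'.length : Int) = nKindCard hand_string.toList n := by
    unfold nKindCard
    rw [← hfin, List.toFinset_card_of_nodup hndp]
  have hpos : (cnt' ≠ []) ↔ (0 < nKindCard hand_string.toList n) := by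
    rw [← hlen]
    rcases cnt' with _ | ⟨a, t⟩
    · simp
    · simp only [ne_eq, reduceCtorEq, not_false_eq_true, true_iff, List.length_cons]
      push_cast
      omega
  constructor
  · rw [hrw]; dsimp only; exact hlen
  · rw [hrw]; dsimp only; exact decide_eq_decide.mpr hpos

-- ---- B side ----
lemma dropWhile_cons_head_false {α : Type} (p : α → Bool) (l : List α) (x : α) (xs : List α)
    (h : l.dropWhile p = x :: xs) : p x = false := by
  have hne : l.dropWhile p ≠ [] := by simp [h]
  simpa [h] using List.head_dropWhile_not p hne
lemma altGo_sorted (n : Int) :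
    ∀ (s : List Char), s.Pairwise (· ≤ ·) → altGo n s = nKindCard s n := by
  suffices H : ∀ (N : Nat) (s : List Char), s.length ≤ N → s.Pairwise (· ≤ ·) →
      altGo n s = nKindCard s n from fun s hs => H s.length s le_rfl hs
  intro N
  induction N with
  | zero =>
    intro s hlen _
    have : s = [] := List.eq_nil_of_length_eq_zero (Nat.le_zero.mp hlen)
    subst this
    simp [altGo, nKindCard]
  | succ N ih =>
    intro s hlen hsort
    rcases s with _ | ⟨c, t⟩
    · simp [altGo, nKindCard]
    · -- split the leading run of c
      obtain ⟨w, hw⟩ : ∃ w, (c :: t).takeWhile (fun d => d == c) = w := ⟨_, rfl⟩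
      obtain ⟨r, hr⟩ : ∃ r, (c :: t).dropWhile (fun d => d == c) = r := ⟨_, rfl⟩
      have hsplit : w ++ r = c :: t := by rw [← hw, ← hr]; exact List.takeWhile_append_dropWhile
      have hall_w : ∀ x ∈ w, x = c := by
        intro x hx
        rw [← hw] at hx
        have := List.mem_takeWhile_imp hx
        simpa using this
      have hcw : c ∈ w := by
        have : w = c :: (t.takeWhile (fun d => d == c)) := by
          rw [← hw]; simp
        rw [this]; exact List.mem_cons_self
      have hr_sorted : r.Pairwise (· ≤ ·) := by
        rw [← hr]; exact hsort.sublist (List.dropWhile_sublist _)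
      have hc_le : ∀ x ∈ t, c ≤ x := (List.pairwise_cons.mp hsort).1
      have hc_notin_r : c ∉ r := by
        rcases r with _ | ⟨h0, r'⟩
        · exact List.not_mem_nil
        · have hh : (h0 == c) = false := dropWhile_cons_head_false (fun d => d == c) (c :: t) h0 r' hr
          have hhne : h0 ≠ c := by simpa using hh
          have hhmem : h0 ∈ c :: t := by
            have : h0 ∈ (c :: t).dropWhile (fun d => d == c) := by rw [hr]; exact List.mem_cons_self
            exact (List.dropWhile_sublist _).mem this
          have hch : c < h0 := by
            rcases List.mem_cons.mp hhmem with h | h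
            · exact absurd h hhne
            · exact lt_of_le_of_ne (hc_le _ h) (Ne.symm hhne)
          have hhd : ∀ x ∈ r', h0 ≤ x := (List.pairwise_cons.mp hr_sorted).1
          intro hcr
          rcases List.mem_cons.mp hcr with h | h
          · exact absurd h (ne_of_lt hch)
          · exact absurd rfl (ne_of_lt (lt_of_lt_of_le hch (hhd c h))).symm
      have hcount_c : (c :: t).count c = w.length := by
        rw [← hsplit, List.count_append]
        have h1 : w.count c = w.length := List.count_eq_length.mpr (fun b hb => (hall_w b hb).symm)
        have h2 : r.count c = 0 := List.count_eq_zero.mpr hc_notin_r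
        omega
      have hcount_d : ∀ d, d ≠ c → (c :: t).count d = r.count d := by
        intro d hd
        rw [← hsplit, List.count_append]
        have : w.count d = 0 := List.count_eq_zero.mpr (fun hdw => hd (hall_w d hdw))
        omega
      have hwfin : w.toFinset = {c} := by
        ext x
        simp only [List.mem_toFinset, Finset.mem_singleton]
        exact ⟨hall_w x, fun h => h ▸ hcw⟩
      have hfin : (c :: t).toFinset = insert c r.toFinset := by
        rw [← hsplit, List.toFinset_append, hwfin]
        ext x
        simp
      have hrlen : r.length ≤ N := by
        have h1 : r = t.dropWhile (fun d => d == c) := by rw [← hr]; simp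
        have h2 := List.length_dropWhile_le (fun d => d == c) t
        simp only [List.length_cons] at hlen
        rw [h1]
        omega
      have hIH := ih r hrlen hr_sorted
      have hstep : altGo n (c :: t) = (if (w.length : Int) = n then 1 else 0) + altGo n r := by
        rw [altGo, hw, hr]
      have hcard : nKindCard (c :: t) n
          = (if ((c :: t).count c : Int) = n then 1 else 0) + nKindCard r n := by
        unfold nKindCard
        rw [hfin, Finset.filter_insert]
        have hcnotin : c ∉ r.toFinset.filter (fun d => (r.count d : Int) = n) := by
          simp [List.mem_toFinset, hc_notin_r]
        have hcong : r.toFinset.filter (fun d => ((c :: t).count d : Int) = n)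
            = r.toFinset.filter (fun d => (r.count d : Int) = n) := by
          apply Finset.filter_congr
          intro d hd
          have hdc : d ≠ c := fun h => hc_notin_r (h ▸ List.mem_toFinset.mp hd)
          rw [hcount_d d hdc]
        split_ifs with h
        · rw [hcong, Finset.card_insert_of_notMem hcnotin]
          push_cast
          ring
        · rw [hcong]; ring
      rw [hstep, hIH, hcard, hcount_c]

lemma B_matches (hand_string : String) (n : Int) :
    (has_n_of_a_kind_1_alt hand_string n).2 = nKindCard hand_string.toList n ∧
    (has_n_of_a_kind_1_alt hand_string n).1 = decide (0 < nKindCard hand_string.toList n) := by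
  have hperm : (PySem.List.sorted hand_string.toList (fun c => c) false).Perm hand_string.toList :=
    PySem.List.sorted_perm hand_string.toList (fun c => c) false
  have hpw : (PySem.List.sorted hand_string.toList (fun c => c)).Pairwise (· ≤ ·) := by
    simpa using PySem.List.sorted_pairwise hand_string.toList (fun c => c)
  have h1 := altGo_sorted n _ hpw
  have h2 : nKindCard (PySem.List.sorted hand_string.toList (fun c => c) false) n
      = nKindCard hand_string.toList n := by
    unfold nKindCard
    have hfs := List.toFinset_eq_of_perm _ _ hperm
    rw [hfs]
    congr 1
    apply congrArg
    apply Finset.filter_congr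
    intro d _
    rw [hperm.count_eq d]
  have hkey : altGo n (PySem.List.sorted hand_string.toList (fun c => c) false)
      = nKindCard hand_string.toList n := by rw [h1, h2]
  constructor
  · show altGo n _ = _
    exact hkey
  · show decide (altGo n _ > 0) = _
    rw [hkey]

-- ===== VERDICT (by name: the statement is the Claim_ definition above) =====
theorem has_n_of_a_kind_1_spec : Claim_equal_has_n_of_a_kind_1 := by
  intro s n _
  unfold Spec_has_n_of_a_kind_1
  obtain ⟨ha2, ha1⟩ := A_matches s n
  obtain ⟨hb2, hb1⟩ := B_matches s n
  have : (has_n_of_a_kind_1 s n).1 = (has_n_of_a_kind_1_alt s n).1 := by rw [ha1, hb1]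
  have h2 : (has_n_of_a_kind_1 s n).2 = (has_n_of_a_kind_1_alt s n).2 := by rw [ha2, hb2]
  exact Prod.ext this h2
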